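-- pv_equiv track=rewrite | github.com/Sarach-git/CS-SBU-eAdvancedAlgorithms-MSc-2023 | Assignments/401422044/homework-2/algorithm.py | is_order_possible
-- ===== SOURCE A (Python) =====
-- def is_order_possible(N, G, A, assigned_times, current_time):
--     # بررسی اتمام حالت پایه (تمام سارقان در سالن حضور داشته‌باشند)
--     if len(assigned_times) == N:
--         return True
--
--     # قرار دادن سارق در سالن
--     for i in range(N):
--         if i not in assigned_times:
--             assigned_times.add(i)
--
--             # بررسی شرایط حضور در سالن
--             if current_time + A[i] <= G and is_order_possible(N, G, A, assigned_times, current_time + A[i]):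
--                 return True
--
--             assigned_times.remove(i)
--
--     return False
-- ===== SOURCE B (Python) =====
-- def is_order_possible(N, G, A, assigned_times, current_time):
--     # Greedy instead of backtracking: the search succeeds iff the k = N - len(assigned_times)
--     # smallest remaining times, taken in ascending order, keep every prefix sum <= G.
--     # (Return value only; unlike A, this never mutates assigned_times.)
--     k = N - len(assigned_times)
--     if k <= 0:
--         return k == 0
--     needed = sorted(A[i] for i in range(N) if i not in assigned_times)
--     total = current_time
--     for x in needed[:k]:
--         total += x
--         if total > G:
--             return False
--     return True
-- ===== Notes on version B (the rewrite author's own statement) =====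
-- stated objective: alternative
-- what changed: Replaces A's recursive backtracking search over orderings by a greedy check: sort the unassigned times and test whether the k = N - len(assigned_times) smallest of them, taken in ascending order, keep every prefix sum below G (an exchange argument shows this order is optimal, also for negative times).
-- outside the precondition, e.g. on is_order_possible(2, 10, [1], {5}, 0): A returns True, B raises IndexError
import Mathlib
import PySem

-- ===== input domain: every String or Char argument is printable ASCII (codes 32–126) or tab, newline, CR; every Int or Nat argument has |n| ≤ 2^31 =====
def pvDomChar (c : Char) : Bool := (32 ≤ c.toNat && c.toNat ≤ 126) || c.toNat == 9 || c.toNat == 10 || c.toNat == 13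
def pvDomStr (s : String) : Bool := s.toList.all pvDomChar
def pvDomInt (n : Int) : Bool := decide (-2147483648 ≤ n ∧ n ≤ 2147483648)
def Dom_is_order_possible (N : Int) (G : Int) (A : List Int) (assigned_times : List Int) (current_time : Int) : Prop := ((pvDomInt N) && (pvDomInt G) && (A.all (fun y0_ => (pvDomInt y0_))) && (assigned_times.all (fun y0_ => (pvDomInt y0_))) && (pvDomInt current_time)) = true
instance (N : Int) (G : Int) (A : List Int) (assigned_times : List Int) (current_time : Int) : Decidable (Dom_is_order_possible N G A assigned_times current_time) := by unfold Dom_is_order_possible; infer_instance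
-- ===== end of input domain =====

-- B replaces A's recursive backtracking over orderings by a sort-and-prefix-check greedy
-- (objective: alternative). Return value only: A mutates the set assigned_times, B does not.


-- ===== PORT A =====
-- number of indices of range(N) not yet in the set: A's recursion adds one of them each call
def pvCntLeft (N : Int) (s : List Int) : Nat :=
  ((PySem.List.pyRange 0 N 1).filter (fun j => !decide (j ∈ s))).length

-- termination helper for the port of A (cited in its decreasing_by)
theorem pvCntLeft_lt (N : Int) (s : List Int) (i : Int)
    (hi : i ∈ PySem.List.pyRange 0 N 1) (hns : i ∉ s) :
    pvCntLeft N (s ++ [i]) < pvCntLeft N s := by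
  unfold pvCntLeft
  have hmono : ∀ l : List Int,
      (l.filter (fun j => !decide (j ∈ s ++ [i]))).length ≤ (l.filter (fun j => !decide (j ∈ s))).length := by
    intro l
    induction l with
    | nil => simp
    | cons x t ih =>
      by_cases hx : x ∈ s ++ [i] <;> by_cases hx' : x ∈ s <;>
        simp_all [List.filter_cons] <;> omega
  have key : ∀ l : List Int, i ∈ l →
      (l.filter (fun j => !decide (j ∈ s ++ [i]))).length < (l.filter (fun j => !decide (j ∈ s))).length := by
    intro l hl
    induction l with
    | nil => cases hl
    | cons x t ih =>
      by_cases hx : x = i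
      · subst hx
        have h1 : (!decide (x ∈ s ++ [x])) = false := by simp
        have h2 : (!decide (x ∈ s)) = true := by simp [hns]
        rw [List.filter_cons, List.filter_cons, h1, h2]
        simp only [Bool.false_eq_true, if_false, if_true, List.length_cons]
        have := hmono t
        omega
      · have hti : i ∈ t := by
          rcases List.mem_cons.mp hl with h | h
          · exact absurd h.symm hx
          · exact h
        have hxiff : (x ∈ s ++ [i]) ↔ (x ∈ s) := by
          simp [List.mem_append, hx]
        by_cases hxs : x ∈ s ++ [i]
        · have hxs' : x ∈ s := hxiff.mp hxs
          simp only [List.filter_cons, hxs, hxs', decide_true, Bool.not_true, if_false]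
          exact ih hti
        · have hxs' : ¬ (x ∈ s) := fun h => hxs (hxiff.mpr h)
          simp only [List.filter_cons, hxs, hxs', decide_false, Bool.not_false, if_true,
            List.length_cons]
          have := ih hti
          omega
  exact key _ hi

-- literal port of A's recursive backtracking (assigned_times is a Python set: PySem.Set).
-- Where Python raises IndexError on A[i] (excluded by Pre_) the port yields false.
def is_order_possible (N : Int) (G : Int) (A : List Int) (assigned_times : List Int) (current_time : Int) : Bool :=
  if PySem.Set.len assigned_times = N then true
  else
    (PySem.List.pyRange 0 N 1).attach.any (fun ⟨i, hi⟩ =>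
      if hmem : i ∈ assigned_times then false
      else
        match PySem.List.pyGet? A i with
        | none => false  -- Python raises IndexError here; such inputs are outside Pre_
        | some ai =>
          decide (current_time + ai ≤ G) &&
            is_order_possible N G A (PySem.Set.add assigned_times i) (current_time + ai))
termination_by pvCntLeft N assigned_times
decreasing_by
  rw [PySem.Set.add_of_not_mem hmem]
  exact pvCntLeft_lt N assigned_times i hi hmem

-- ===== PORT B =====
-- B's prefix-sum loop: `for x in needed[:k]: total += x; if total > G: return False` / `return True`
def pvBLoop (G : Int) (xs : List Int) (total : Int) : Bool :=
  match xs with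
  | [] => true
  | x :: rest => if total + x > G then false else pvBLoop G rest (total + x)

-- literal port of B (Source B): sort the values of the unassigned indices, check the k smallest.
-- A[i] is pyGetD (Python raises IndexError out of range; such inputs are outside Pre_).
def is_order_possible_alt (N : Int) (G : Int) (A : List Int) (assigned_times : List Int) (current_time : Int) : Bool :=
  let k : Int := N - PySem.Set.len assigned_times
  if k ≤ 0 then k == 0
  else
    let needed := PySem.List.sorted
      (((PySem.List.pyRange 0 N 1).filter (fun i => !decide (i ∈ assigned_times))).map
        (fun i => PySem.List.pyGetD A i 0)) (fun x => x) false
    pvBLoop G (needed.take k.toNat) current_time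

-- ===== PRECONDITION & SPEC =====
-- Pre_ excludes (a) lists not representing a Python set (duplicates: the type convention for
-- set[int] is a duplicate-free list), and (b) inputs where some unassigned index i < N is out of
-- range of A (the second disjunct says: the indices len(A) ≤ i < N are ALL already assigned):
-- Python B always raises IndexError on the excluded inputs of (b), and Python A raises IndexError
-- there whenever the search reaches such an i (on some of them A happens to return True first).
def Pre_is_order_possible (N : Int) (G : Int) (A : List Int) (assigned_times : List Int) (current_time : Int) : Prop :=
  assigned_times.Nodup ∧
    (N ≤ (A.length : Int) ∨
      ((assigned_times.filter (fun x => decide ((A.length : Int) ≤ x ∧ x < N))).length : Int)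
        = N - A.length)
instance (N : Int) (G : Int) (A : List Int) (assigned_times : List Int) (current_time : Int) : Decidable (Pre_is_order_possible N G A assigned_times current_time) := by unfold Pre_is_order_possible; infer_instance

def pvWitness_is_order_possible : Int × Int × List Int × List Int × Int := (3, 10, [3, 4, 2], [1], 0)

def Spec_is_order_possible (N : Int) (G : Int) (A : List Int) (assigned_times : List Int) (current_time : Int) (out : Bool) : Prop := out = is_order_possible_alt N G A assigned_times current_time
instance (N : Int) (G : Int) (A : List Int) (assigned_times : List Int) (current_time : Int) (out : Bool) : Decidable (Spec_is_order_possible N G A assigned_times current_time out) := by unfold Spec_is_order_possible; infer_instance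

-- ===== CLAIM (what is proved, stated in full; the proofs are below) =====
def Claim_equal_is_order_possible : Prop := ∀ (N : Int) (G : Int) (A : List Int) (assigned_times : List Int) (current_time : Int), Dom_is_order_possible N G A assigned_times current_time → Pre_is_order_possible N G A assigned_times current_time → Spec_is_order_possible N G A assigned_times current_time (is_order_possible N G A assigned_times current_time)

-- ===== LEMMAS AND PROOFS =====

-- `Good N G A s t idx`: idx is a run of A's search from state (s, t) that reaches the base case:
-- distinct unassigned indices, one per missing slot, whose values keep every prefix sum ≤ G.
def pvGood (N G : Int) (A : List Int) (s : List Int) (t : Int) (idx : List Int) : Prop :=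
  ((s.length : Int) + idx.length = N) ∧ idx.Nodup ∧
    (∀ i ∈ idx, (0 ≤ i ∧ i < N) ∧ i ∉ s) ∧
    pvBLoop G (idx.map (fun i => PySem.List.pyGetD A i 0)) t = true

-- A's search succeeds iff some Good run exists
theorem pvChar (N G : Int) (A : List Int) : ∀ n (s : List Int) (t : Int), pvCntLeft N s = n →
    (∀ i ∈ PySem.List.pyRange 0 N 1, i ∉ s → i < (A.length : Int)) →
    (is_order_possible N G A s t = true ↔ ∃ idx, pvGood N G A s t idx) := by
  intro n
  induction n using Nat.strong_induction_on with
  | _ n ih =>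
    intro s t hcnt hpre
    rw [is_order_possible]
    by_cases hbase : PySem.Set.len s = N
    · simp only [hbase, if_true, true_iff]
      have hb' : (s.length : Int) = N := by simpa [PySem.Set.len] using hbase
      exact ⟨[], by simp [hb'], List.nodup_nil, by simp, by simp [pvBLoop]⟩
    · simp only [hbase, if_false]
      have hlen : (s.length : Int) ≠ N := by simpa [PySem.Set.len] using hbase
      constructor
      · intro hany
        rw [List.any_eq_true] at hany
        obtain ⟨⟨i, hi⟩, _, hfi⟩ := hany
        simp only at hfi
        by_cases hmem : i ∈ s
        · rw [dif_pos hmem] at hfi; cases hfi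
        · rw [dif_neg hmem] at hfi
          obtain ⟨hi0, hiN⟩ := PySem.List.mem_pyRange_one.mp hi
          have hiA : i < (A.length : Int) := hpre i hi hmem
          have hget : PySem.List.pyGet? A i = some (PySem.List.pyGetD A i 0) := by
            rw [PySem.List.pyGet?_eq_some_getElem A hi0 hiA,
                PySem.List.pyGetD_eq_getElem A 0 hi0 hiA]
          rw [hget] at hfi
          simp only [Bool.and_eq_true, decide_eq_true_eq] at hfi
          obtain ⟨htG, hrec⟩ := hfi
          rw [PySem.Set.add_of_not_mem hmem] at hrec
          have hdec : pvCntLeft N (s ++ [i]) < n := hcnt ▸ pvCntLeft_lt N s i hi hmem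
          have hpre' : ∀ j ∈ PySem.List.pyRange 0 N 1, j ∉ s ++ [i] → j < (A.length : Int) := by
            intro j hj hjn
            exact hpre j hj (fun h => hjn (List.mem_append_left _ h))
          obtain ⟨idx, hg1, hg2, hg3, hg4⟩ :=
            ((ih _ hdec (s ++ [i]) (t + PySem.List.pyGetD A i 0) rfl hpre').mp hrec)
          refine ⟨i :: idx, ?_, ?_, ?_, ?_⟩
          · simp only [List.length_append, List.length_singleton] at hg1
            simp only [List.length_cons]
            push_cast at hg1 ⊢
            omega
          · refine List.nodup_cons.mpr ⟨fun hin => ?_, hg2⟩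
            exact (hg3 i hin).2 (by simp)
          · intro j hj
            rcases List.mem_cons.mp hj with rfl | hj'
            · exact ⟨⟨hi0, hiN⟩, hmem⟩
            · exact ⟨(hg3 j hj').1, fun h => (hg3 j hj').2 (List.mem_append_left _ h)⟩
          · simp only [List.map_cons]
            unfold pvBLoop
            have hgt : ¬ (t + PySem.List.pyGetD A i 0 > G) := by omega
            simp only [hgt, if_false]
            exact hg4
      · rintro ⟨idx, hg1, hg2, hg3, hg4⟩
        cases idx with
        | nil => simp at hg1; omega
        | cons i idx' =>
          obtain ⟨⟨hi0, hiN⟩, hmem⟩ := hg3 i (by simp)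
          have hi : i ∈ PySem.List.pyRange 0 N 1 := PySem.List.mem_pyRange_one.mpr ⟨hi0, hiN⟩
          rw [List.any_eq_true]
          refine ⟨⟨i, hi⟩, List.mem_attach _ _, ?_⟩
          simp only
          rw [dif_neg hmem]
          have hiA : i < (A.length : Int) := hpre i hi hmem
          have hget : PySem.List.pyGet? A i = some (PySem.List.pyGetD A i 0) := by
            rw [PySem.List.pyGet?_eq_some_getElem A hi0 hiA,
                PySem.List.pyGetD_eq_getElem A 0 hi0 hiA]
          rw [hget]
          simp only [List.map_cons] at hg4
          unfold pvBLoop at hg4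
          by_cases hgt : t + PySem.List.pyGetD A i 0 > G
          · simp [hgt] at hg4
          · simp only [hgt, if_false] at hg4
            simp only [Bool.and_eq_true, decide_eq_true_eq]
            refine ⟨by omega, ?_⟩
            rw [PySem.Set.add_of_not_mem hmem]
            have hdec : pvCntLeft N (s ++ [i]) < n := hcnt ▸ pvCntLeft_lt N s i hi hmem
            have hpre' : ∀ j ∈ PySem.List.pyRange 0 N 1, j ∉ s ++ [i] → j < (A.length : Int) := by
              intro j hj hjn
              exact hpre j hj (fun h => hjn (List.mem_append_left _ h))
            refine (ih _ hdec (s ++ [i]) (t + PySem.List.pyGetD A i 0) rfl hpre').mpr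
              ⟨idx', ?_, (List.nodup_cons.mp hg2).2, ?_, hg4⟩
            · simp only [List.length_cons] at hg1
              simp only [List.length_append, List.length_singleton]
              push_cast at hg1 ⊢
              omega
            · intro j hj
              refine ⟨(hg3 j (by simp [hj])).1, fun h => ?_⟩
              rcases List.mem_append.mp h with h' | h'
              · exact (hg3 j (by simp [hj])).2 h'
              · have : j = i := by simpa using h'
                exact (List.nodup_cons.mp hg2).1 (this ▸ hj)

-- Forall₂ (·≤·) is transitive
theorem pvForall2_trans : ∀ {u v w : List Int}, List.Forall₂ (·≤·) u v → List.Forall₂ (·≤·) v w →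
    List.Forall₂ (·≤·) u w := by
  intro u v w h1 h2
  induction h1 generalizing w with
  | nil => cases h2; exact .nil
  | cons hab _ ih =>
    cases h2 with
    | cons hbc h2' => exact .cons (le_trans hab hbc) (ih h2')

-- pointwise-smaller list with smaller start keeps the prefix check
theorem pvBLoop_mono (G : Int) : ∀ {u w : List Int} (t₁ t₂ : Int), List.Forall₂ (·≤·) u w →
    t₁ ≤ t₂ → pvBLoop G w t₂ = true → pvBLoop G u t₁ = true := by
  intro u w t₁ t₂ h
  induction h generalizing t₁ t₂ with
  | nil => intro _ _; simp [pvBLoop]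
  | @cons a b u' w' hab _ ih =>
    intro hle hw
    unfold pvBLoop at hw ⊢
    by_cases hgb : t₂ + b > G
    · simp [hgb] at hw
    · simp only [hgb, if_false] at hw
      have hga : ¬ (t₁ + a > G) := by omega
      simp only [hga, if_false]
      exact ih (t₁ + a) (t₂ + b) (by omega) hw

-- moving a minimal element to the front keeps the prefix check
theorem pvBLoop_move_front (G y : Int) : ∀ (l₁ l₂ : List Int) (t : Int), (∀ a ∈ l₁, y ≤ a) →
    pvBLoop G (l₁ ++ y :: l₂) t = true → pvBLoop G (y :: (l₁ ++ l₂)) t = true := by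
  intro l₁
  induction l₁ with
  | nil => intro l₂ t _ h; simpa using h
  | cons a l₁' ih =>
    intro l₂ t hmin h
    have hya : y ≤ a := hmin a (by simp)
    rw [List.cons_append] at h
    unfold pvBLoop at h
    by_cases hta : t + a > G
    · simp [hta] at h
    · simp only [hta, if_false] at h
      have h1 := ih l₂ (t + a) (fun b hb => hmin b (by simp [hb])) h
      unfold pvBLoop at h1
      by_cases htay : t + a + y > G
      · simp [htay] at h1
      · simp only [htay, if_false] at h1
        show pvBLoop G (y :: a :: (l₁' ++ l₂)) t = true
        unfold pvBLoop
        have hty : ¬ (t + y > G) := by omega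
        simp only [hty, if_false]
        unfold pvBLoop
        have htya : ¬ (t + y + a > G) := by omega
        simp only [htya, if_false]
        have heq : t + a + y = t + y + a := by ring
        rw [heq] at h1
        exact h1

-- sorting a feasible order keeps it feasible (exchange argument)
theorem pvBLoop_perm_sorted (G : Int) : ∀ (l' l : List Int) (t : Int), pvBLoop G l t = true →
    l'.Perm l → l'.Pairwise (·≤·) → pvBLoop G l' t = true := by
  intro l'
  induction l' with
  | nil => intro l t _ _ _; simp [pvBLoop]
  | cons y l'' ih =>
    intro l t hok hperm hpair
    have hy : y ∈ l := hperm.subset (by simp)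
    obtain ⟨l₁, l₂, hyn, hl, her⟩ := List.exists_erase_eq hy
    have hmin : ∀ a ∈ l, y ≤ a := by
      intro a ha
      have ha' : a ∈ y :: l'' := hperm.symm.subset ha
      rcases List.mem_cons.mp ha' with h | h
      · exact le_of_eq h.symm
      · exact (List.pairwise_cons.mp hpair).1 a h
    have h1 : pvBLoop G (y :: (l₁ ++ l₂)) t = true := by
      apply pvBLoop_move_front G y l₁ l₂ t
      · intro a ha
        exact hmin a (by rw [hl]; exact List.mem_append_left _ ha)
      · rw [← hl]; exact hok
    unfold pvBLoop at h1
    by_cases hty : t + y > G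
    · simp [hty] at h1
    · simp only [hty, if_false] at h1
      have hperm' : l''.Perm (l₁ ++ l₂) := by
        have h3 : (y :: l'').Perm (y :: (l₁ ++ l₂)) :=
          hperm.trans (by rw [hl]; exact List.perm_middle)
        exact h3.cons_inv
      show pvBLoop G (y :: l'') t = true
      unfold pvBLoop
      simp only [hty, if_false]
      exact ih (l₁ ++ l₂) (t + y) h1 hperm' (List.pairwise_cons.mp hpair).2

-- a sorted sub-multiset of a sorted list is a sublist
theorem pvSubperm_sorted_sublist : ∀ (v u : List Int), u.Subperm v → u.Pairwise (·≤·) →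
    v.Pairwise (·≤·) → u.Sublist v := by
  intro v
  induction v with
  | nil => intro u h _ _; rw [List.subperm_nil.mp h]
  | cons b v ih =>
    intro u hsub hu hv
    cases u with
    | nil => exact List.nil_sublist _
    | cons a u' =>
      by_cases hab : a = b
      · subst hab
        exact List.Sublist.cons₂ a
          (ih u' ((List.subperm_cons a).mp hsub) (List.pairwise_cons.mp hu).2
            (List.pairwise_cons.mp hv).2)
      · have hmem : a ∈ b :: v := hsub.subset (by simp)
        have hba : b ≤ a := by
          rcases List.mem_cons.mp hmem with h | h
          · exact absurd h hab
          · exact le_of_eq rfl |>.trans ((List.pairwise_cons.mp hv).1 a h)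
        have hbu : b ∉ a :: u' := by
          intro hbin
          rcases List.mem_cons.mp hbin with h | h
          · exact hab h.symm
          · have hable : a ≤ b := (List.pairwise_cons.mp hu).1 b h
            exact hab (le_antisymm hable hba)
        obtain ⟨w, hwp, hws⟩ := hsub
        have hwv : w.Sublist v := by
          cases hws with
          | cons _ h => exact h
          | cons₂ _ h =>
            exfalso
            exact hbu (hwp.subset (by simp))
        exact List.Sublist.cons b (ih (a :: u') ⟨w, hwp, hwv⟩ hu (List.pairwise_cons.mp hv).2)

-- order statistics: the first |u| entries of a sorted superlist are pointwise ≤ the sublist u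
-- shift: dropping the (smallest) head of a sorted list raises the first n entries pointwise
theorem pvTake_shift : ∀ (n : Nat) (v : List Int) (b : Int), (b :: v).Pairwise (·≤·) →
    n ≤ v.length → List.Forall₂ (·≤·) ((b :: v).take n) (v.take n) := by
  intro n
  induction n with
  | zero => intro v b _ _; simp
  | succ n ih =>
    intro v b hp hn
    cases v with
    | nil => simp at hn
    | cons c v' =>
      simp only [List.take_succ_cons]
      refine List.Forall₂.cons ((List.pairwise_cons.mp hp).1 c (by simp)) ?_
      exact ih v' c (List.pairwise_cons.mp hp).2 (by simpa using hn)

theorem pvTake_forall2 : ∀ (v u : List Int), u.Sublist v → v.Pairwise (·≤·) →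
    List.Forall₂ (·≤·) (v.take u.length) u := by
  intro v u hsub
  induction hsub with
  | slnil => intro _; simp
  | @cons u v b hs ih =>
    intro hp
    have h1 := ih (List.pairwise_cons.mp hp).2
    have h2 := pvTake_shift u.length v b hp hs.length_le
    exact pvForall2_trans h2 h1
  | @cons₂ u v a hs ih =>
    intro hp
    simp only [List.length_cons, List.take_succ_cons]
    exact List.Forall₂.cons le_rfl (ih (List.pairwise_cons.mp hp).2)

-- permuting a list under a map: realize a permutation of the images by a permutation of the sources
theorem pvExists_reorder (f : Int → Int) : ∀ (v u : List Int), (u.map f).Perm v →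
    ∃ u' : List Int, u'.Perm u ∧ u'.map f = v := by
  intro v
  induction v with
  | nil =>
    intro u h
    have hu : u = [] := by simpa using List.perm_nil.mp h
    exact ⟨[], by simp [hu], rfl⟩
  | cons y v' ih =>
    intro u h
    have hy : y ∈ u.map f := h.symm.subset (by simp)
    obtain ⟨i, hiu, hif⟩ := List.mem_map.mp hy
    obtain ⟨u₁, u₂, hu⟩ := List.append_of_mem hiu
    have hperm : ((u₁ ++ u₂).map f).Perm v' := by
      have h1 : (u.map f).Perm (f i :: (u₁ ++ u₂).map f) := by
        rw [hu, List.map_append, List.map_cons, List.map_append]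
        exact List.perm_middle
      have h2 : (f i :: (u₁ ++ u₂).map f).Perm (y :: v') := h1.symm.trans h
      rw [hif] at h2
      exact h2.cons_inv
    obtain ⟨u', hup, hum⟩ := ih (u₁ ++ u₂) hperm
    refine ⟨i :: u', ?_, by simp [hum, hif]⟩
    rw [hu]
    exact (hup.cons i).trans List.perm_middle.symm

-- map over a subperm
theorem pvSubperm_map (f : Int → Int) {u v : List Int} (h : u.Subperm v) :
    (u.map f).Subperm (v.map f) := by
  obtain ⟨w, hp, hs⟩ := h
  exact ⟨w.map f, hp.map f, hs.map f⟩

-- the greedy list B checks: values of the unassigned indices, sorted ascending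
def pvSrem (N : Int) (A : List Int) (s : List Int) : List Int :=
  PySem.List.sorted
    (((PySem.List.pyRange 0 N 1).filter (fun i => !decide (i ∈ s))).map
      (fun i => PySem.List.pyGetD A i 0)) (fun x => x) false

-- a Good run exists iff the k smallest unassigned values pass the prefix check
theorem pvFeasible (N G : Int) (A : List Int) (s : List Int) (t : Int) (_hnd : s.Nodup)
    (hk : (s.length : Int) ≤ N) :
    ((∃ idx, pvGood N G A s t idx) ↔
      pvBLoop G ((pvSrem N A s).take (N - s.length).toNat) t = true) := by
  set val : Int → Int := fun i => PySem.List.pyGetD A i 0 with hvaldef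
  set remIdx : List Int := (PySem.List.pyRange 0 N 1).filter (fun i => !decide (i ∈ s)) with hremdef
  have hremnd : remIdx.Nodup := (PySem.List.nodup_pyRange_one 0 N).filter _
  have hsremperm : (pvSrem N A s).Perm (remIdx.map val) := by
    unfold pvSrem
    exact PySem.List.sorted_perm _ _ _
  have hsrempair : (pvSrem N A s).Pairwise (·≤·) := by
    have := PySem.List.sorted_pairwise (remIdx.map val) (fun x => x)
    unfold pvSrem
    simpa using this
  have hcount : ((PySem.List.pyRange 0 N 1).filter (fun i => decide (i ∈ s))).length ≤ s.length := by
    refine List.Subperm.length_le (List.Nodup.subperm ((PySem.List.nodup_pyRange_one 0 N).filter _) ?_)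
    intro x hx
    simpa using (List.mem_filter.mp hx).2
  have hsplit : ((PySem.List.pyRange 0 N 1).filter (fun i => decide (i ∈ s))).length + remIdx.length
      = (PySem.List.pyRange 0 N 1).length := by
    rw [hremdef]
    exact (List.length_eq_length_filter_add (fun i => decide (i ∈ s))).symm
  have hrangelen : (PySem.List.pyRange 0 N 1).length = N.toNat := by
    rw [PySem.List.length_pyRange_one]
    simp
  have hklen : (N - s.length).toNat ≤ remIdx.length := by omega
  have hsremlen : (pvSrem N A s).length = remIdx.length := by
    rw [hsremperm.length_eq, List.length_map]
  constructor
  · rintro ⟨idx, hg1, hg2, hg3, hg4⟩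
    have hsubset : idx ⊆ remIdx := by
      intro j hj
      rw [hremdef, List.mem_filter]
      obtain ⟨⟨hj0, hjN⟩, hjs⟩ := hg3 j hj
      exact ⟨PySem.List.mem_pyRange_one.mpr ⟨hj0, hjN⟩, by simpa using hjs⟩
    have hvs : ((idx.map val).Subperm (remIdx.map val)) := pvSubperm_map val (hg2.subperm hsubset)
    have hoksorted : pvBLoop G (PySem.List.sorted (idx.map val) (fun x => x) false) t = true := by
      refine pvBLoop_perm_sorted G _ _ t hg4 (PySem.List.sorted_perm _ _ _) ?_
      simpa using PySem.List.sorted_pairwise (idx.map val) (fun x => x)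
    have hsubp2 : (PySem.List.sorted (idx.map val) (fun x => x) false).Subperm (pvSrem N A s) :=
      (((PySem.List.sorted_perm (idx.map val) (fun x => x) false).subperm).trans hvs).trans
        hsremperm.symm.subperm
    have hsl := pvSubperm_sorted_sublist (pvSrem N A s) _ hsubp2
      (by simpa using PySem.List.sorted_pairwise (idx.map val) (fun x => x)) hsrempair
    have hf2 := pvTake_forall2 (pvSrem N A s) _ hsl hsrempair
    have hlen1 : (PySem.List.sorted (idx.map val) (fun x => x) false).length = idx.length := by
      rw [(PySem.List.sorted_perm (idx.map val) (fun x => x) false).length_eq, List.length_map]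
    have hlen2 : (N - s.length).toNat = idx.length := by omega
    rw [hlen1, ← hlen2] at hf2
    exact pvBLoop_mono G t t hf2 le_rfl hoksorted
  · intro hok
    have hsp : ((pvSrem N A s).take (N - s.length).toNat).Subperm (remIdx.map val) :=
      ((List.take_sublist _ _).subperm).trans hsremperm.subperm
    obtain ⟨w, hwp, hws⟩ := hsp
    obtain ⟨u, hus, hwu⟩ := List.sublist_map_iff.mp hws
    obtain ⟨u', hup, hum⟩ := pvExists_reorder val ((pvSrem N A s).take (N - s.length).toNat) u
      (by rw [← hwu]; exact hwp)
    have hlen0 : ((pvSrem N A s).take (N - s.length).toNat).length = (N - s.length).toNat := by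
      rw [List.length_take]
      omega
    have hulen : u'.length = (N - s.length).toNat := by
      have h := congrArg List.length hum
      rw [List.length_map] at h
      rw [h, hlen0]
    refine ⟨u', ?_, ?_, ?_, ?_⟩
    · rw [hulen]
      omega
    · exact hup.nodup_iff.mpr (hus.nodup hremnd)
    · intro j hj
      have hj' : j ∈ remIdx := hus.subset (hup.subset hj)
      rw [hremdef, List.mem_filter] at hj'
      obtain ⟨hjr, hjs⟩ := hj'
      obtain ⟨hj0, hjN⟩ := PySem.List.mem_pyRange_one.mp hjr
      exact ⟨⟨hj0, hjN⟩, by simpa using hjs⟩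
    · rw [hum]
      exact hok

-- ===== VERDICT (by name: the statement is the Claim_ definition above) =====
-- Pre_'s closed form says every unassigned index below N is a valid index of A
theorem pvPre_range (N : Int) (A s : List Int) (hnd : s.Nodup)
    (h : N ≤ (A.length : Int) ∨
      ((s.filter (fun x => decide ((A.length : Int) ≤ x ∧ x < N))).length : Int) = N - A.length) :
    ∀ i ∈ PySem.List.pyRange 0 N 1, i ∉ s → i < (A.length : Int) := by
  intro i hi his
  obtain ⟨hi0, hiN⟩ := PySem.List.mem_pyRange_one.mp hi
  by_contra hge
  push_neg at hge
  rcases h with h | h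
  · omega
  · set f := s.filter (fun x => decide ((A.length : Int) ≤ x ∧ x < N)) with hf
    have hfnd : f.Nodup := hnd.filter _
    have hfsub : f ⊆ PySem.List.pyRange (A.length : Int) N 1 := by
      intro x hx
      have := (List.mem_filter.mp hx).2
      simp only [decide_eq_true_eq] at this
      exact PySem.List.mem_pyRange_one.mpr this
    have hilen : (PySem.List.pyRange (A.length : Int) N 1).length = (N - A.length).toNat :=
      PySem.List.length_pyRange_one _ _
    have hperm : f.Perm (PySem.List.pyRange (A.length : Int) N 1) :=
      (hfnd.subperm hfsub).perm_of_length_le (by omega)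
    have : i ∈ f := hperm.symm.subset (PySem.List.mem_pyRange_one.mpr ⟨hge, hiN⟩)
    exact his (List.mem_filter.mp this).1

theorem is_order_possible_spec : Claim_equal_is_order_possible := by
  intro N G A s t _ hpre
  obtain ⟨hnd, hp2⟩ := hpre
  have hrange := pvPre_range N A s hnd hp2
  unfold Spec_is_order_possible
  unfold is_order_possible_alt
  simp only [PySem.Set.len]
  by_cases hk0 : N - (s.length : Int) ≤ 0
  · rw [if_pos hk0]
    by_cases hk : N - (s.length : Int) = 0
    · have hbase : PySem.Set.len s = N := by simp [PySem.Set.len]; omega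
      rw [is_order_possible, if_pos hbase]
      simp [hk]
    · have hA : is_order_possible N G A s t = false := by
        rw [← Bool.not_eq_true, pvChar N G A (pvCntLeft N s) s t rfl hrange]
        rintro ⟨idx, hg1, -, -, -⟩
        omega
      rw [hA]
      simp [hk]
  · rw [if_neg hk0]
    have hiff := (pvChar N G A (pvCntLeft N s) s t rfl hrange).trans
      (pvFeasible N G A s t hnd (by omega))
    rw [Bool.eq_iff_iff, hiff]
    unfold pvSrem
    rfl
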